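-- pv_equiv track=rewrite | github.com/PengJiaXi517/tagger | raw_data_preprocess/condition_packer.py | match_lane_seqs
-- ===== SOURCE A (Python) =====
-- from typing import Any, Dict, List, Set, Tuple, Union
--
-- def match_lane_seqs(lane_seg_ids: Set, all_lane_seqs: List[Set]):
--     max_match = 0
--     curr_match_ids = []
--     for idx, lane_seq in enumerate(all_lane_seqs):
--         match_nums = len(lane_seg_ids & lane_seq)
--         if match_nums > max_match:
--             max_match = match_nums
--             curr_match_ids = [idx]
--         elif match_nums == max_match and max_match > 0:
--             curr_match_ids.append(idx)
--     return curr_match_ids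
-- ===== SOURCE B (Python) =====
-- def match_lane_seqs(lane_seg_ids, all_lane_seqs):
--     # Group the candidate indices by intersection size into a dict, then a single
--     # key-max lookup picks the best bucket; the positive guard yields [] when no
--     # candidate shares any element.
--     buckets = {}
--     for idx, lane_seq in enumerate(all_lane_seqs):
--         buckets.setdefault(len(lane_seg_ids & lane_seq), []).append(idx)
--     best = max(buckets, default=0)
--     return buckets[best] if best > 0 else []
-- ===== Notes on version B (the rewrite author's own statement) =====
-- stated objective: alternative
-- what changed: Replaces A's single-pass running-max loop with inline tie tracking by a group-by: a dict buckets candidate indices by intersection size, then one max over the dict keys selects the bucket to return (or [] when the best size is 0).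
import Mathlib
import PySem

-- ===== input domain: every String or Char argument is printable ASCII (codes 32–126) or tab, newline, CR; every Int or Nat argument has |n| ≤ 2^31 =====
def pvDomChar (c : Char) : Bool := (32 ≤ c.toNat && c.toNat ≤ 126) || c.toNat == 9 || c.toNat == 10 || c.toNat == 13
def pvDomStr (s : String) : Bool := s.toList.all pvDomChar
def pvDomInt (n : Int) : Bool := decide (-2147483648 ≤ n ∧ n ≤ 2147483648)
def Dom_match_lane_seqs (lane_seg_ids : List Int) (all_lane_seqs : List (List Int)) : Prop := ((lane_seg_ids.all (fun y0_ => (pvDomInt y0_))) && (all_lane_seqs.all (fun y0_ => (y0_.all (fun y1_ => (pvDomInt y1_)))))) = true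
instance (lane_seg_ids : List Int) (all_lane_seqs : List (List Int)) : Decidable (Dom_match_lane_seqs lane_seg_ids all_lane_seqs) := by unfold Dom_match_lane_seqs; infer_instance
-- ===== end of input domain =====

-- B replaces A's single-pass running-max loop (inline tie handling) by a group-by:
-- a dict bucketing the candidate indices by intersection size, then one key-max lookup.

-- ===== PORT A =====
-- len(lane_seg_ids & lane_seq)
def pvIsect (lane_seg_ids lane_seq : List Int) : Int :=
  PySem.Set.len (PySem.Set.inter lane_seg_ids lane_seq)

def match_lane_seqs (lane_seg_ids : List Int) (all_lane_seqs : List (List Int)) : List Int :=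
  ((PySem.List.enumerate all_lane_seqs 0).foldl
    (fun (st : Int × List Int) p =>
      let match_nums := pvIsect lane_seg_ids p.2
      if match_nums > st.1 then (match_nums, [p.1])
      else if match_nums = st.1 ∧ st.1 > 0 then (st.1, st.2 ++ [p.1])
      else st) ((0 : Int), ([] : List Int))).2

-- ===== PORT B =====
def match_lane_seqs_alt (lane_seg_ids : List Int) (all_lane_seqs : List (List Int)) : List Int :=
  -- buckets.setdefault(c, []).append(idx)  ==  buckets[c] = buckets.get(c, []) + [idx]  ==  Dict.modify c [] (· ++ [idx])
  let buckets := (PySem.List.enumerate all_lane_seqs 0).foldl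
    (fun (d : PySem.Dict Int (List Int)) p =>
      d.modify (pvIsect lane_seg_ids p.2) [] (fun v => v ++ [p.1])) PySem.Dict.empty
  let best := PySem.List.maxD buckets.keys (fun k => k) 0   -- max(buckets, default=0)
  -- buckets[best]: when best > 0 the key 'best' is present (.getD [] only strips the Option)
  if best > 0 then (buckets.get? best).getD [] else []

-- ===== PRECONDITION & SPEC =====
def Spec_match_lane_seqs (lane_seg_ids : List Int) (all_lane_seqs : List (List Int)) (out : List Int) : Prop := out = match_lane_seqs_alt lane_seg_ids all_lane_seqs
instance (lane_seg_ids : List Int) (all_lane_seqs : List (List Int)) (out : List Int) : Decidable (Spec_match_lane_seqs lane_seg_ids all_lane_seqs out) := by unfold Spec_match_lane_seqs; infer_instance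

-- ===== CLAIM (what is proved, stated in full; the proofs are below) =====
def Claim_equal_match_lane_seqs : Prop := ∀ (lane_seg_ids : List Int) (all_lane_seqs : List (List Int)), Dom_match_lane_seqs lane_seg_ids all_lane_seqs → Spec_match_lane_seqs lane_seg_ids all_lane_seqs (match_lane_seqs lane_seg_ids all_lane_seqs)

-- ===== LEMMAS AND PROOFS =====

lemma pvIsect_nonneg (ids s : List Int) : 0 ≤ pvIsect ids s := by
  simp [pvIsect, PySem.Set.len]

lemma init_le_foldmax (f : List Int → Int) :
    ∀ (seqs : List (List Int)) (mx : Int), mx ≤ seqs.foldl (fun a s => max a (f s)) mx := by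
  intro seqs
  induction seqs with
  | nil => intro mx; simp
  | cons s rest ih =>
      intro mx
      calc mx ≤ max mx (f s) := le_max_left _ _
        _ ≤ _ := ih _

-- A's loop, characterised: running max = fold max; collected ids = the max's indices.
lemma loopA_spec (f : List Int → Int) :
    ∀ (seqs : List (List Int)) (i mx : Int) (acc : List Int), 0 ≤ mx →
    ((PySem.List.enumerate seqs i).foldl
      (fun (st : Int × List Int) p =>
        let m := f p.2
        if m > st.1 then (m, [p.1])
        else if m = st.1 ∧ st.1 > 0 then (st.1, st.2 ++ [p.1])
        else st) (mx, acc))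
    = (seqs.foldl (fun a s => max a (f s)) mx,
       if seqs.foldl (fun a s => max a (f s)) mx > mx
       then ((PySem.List.enumerate seqs i).filter
              (fun p => f p.2 == seqs.foldl (fun a s => max a (f s)) mx)).map (fun p => p.1)
       else acc ++ (if mx > 0
             then ((PySem.List.enumerate seqs i).filter (fun p => f p.2 == mx)).map (fun p => p.1)
             else [])) := by
  intro seqs
  induction seqs with
  | nil =>
      intro i mx acc _
      simp [PySem.List.enumerate_nil]
  | cons s rest ih =>
      intro i mx acc hmx
      rw [PySem.List.enumerate_cons]
      simp only [List.foldl_cons, List.filter_cons]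
      by_cases h1 : f s > mx
      · -- new max
        have hmax : max mx (f s) = f s := max_eq_right (le_of_lt h1)
        rw [if_pos h1, hmax]
        rw [ih (i + 1) (f s) [i] (le_trans hmx (le_of_lt h1))]
        have hb : f s ≤ rest.foldl (fun a s => max a (f s)) (f s) := init_le_foldmax f rest (f s)
        have hbmx : rest.foldl (fun a s => max a (f s)) (f s) > mx := lt_of_lt_of_le h1 hb
        rw [if_pos hbmx]
        by_cases h2 : rest.foldl (fun a s => max a (f s)) (f s) > f s
        · rw [if_pos h2]
          have : ¬ (f s == rest.foldl (fun a s => max a (f s)) (f s)) = true := by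
            simp; omega
          simp [this]
        · have hbe : rest.foldl (fun a s => max a (f s)) (f s) = f s := le_antisymm (not_lt.mp h2) hb
          rw [if_neg h2, hbe]
          have hpos : f s > 0 := lt_of_le_of_lt hmx h1
          rw [if_pos hpos]
          simp
      · rw [if_neg h1]
        have hmax : max mx (f s) = mx := max_eq_left (not_lt.mp h1)
        rw [hmax]
        have hb : mx ≤ rest.foldl (fun a s => max a (f s)) mx := init_le_foldmax f rest mx
        by_cases h2 : f s = mx ∧ mx > 0
        · -- tie, appended
          rw [if_pos h2]
          rw [ih (i + 1) mx (acc ++ [i]) hmx]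
          by_cases h3 : rest.foldl (fun a s => max a (f s)) mx > mx
          · rw [if_pos h3, if_pos h3]
            have : ¬ (f s == rest.foldl (fun a s => max a (f s)) mx) = true := by
              simp; omega
            simp [this]
          · rw [if_neg h3, if_neg h3, if_pos h2.2, if_pos h2.2]
            have : (f s == mx) = true := by simp [h2.1]
            simp [this]
        · -- skipped
          rw [if_neg h2]
          rw [ih (i + 1) mx acc hmx]
          by_cases h3 : rest.foldl (fun a s => max a (f s)) mx > mx
          · rw [if_pos h3, if_pos h3]
            have : ¬ (f s == rest.foldl (fun a s => max a (f s)) mx) = true := by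
              simp
              have := not_lt.mp h1
              omega
            simp [this]
          · rw [if_neg h3, if_neg h3]
            by_cases h4 : mx > 0
            · rw [if_pos h4, if_pos h4]
              have hne : f s ≠ mx := by
                intro he; exact h2 ⟨he, h4⟩
              have : ¬ (f s == mx) = true := by simp [hne]
              simp [this]
            · rw [if_neg h4, if_neg h4]

lemma enumerate_map_snd (f : List Int → Int) :
    ∀ (xs : List (List Int)) (i : Int),
    (PySem.List.enumerate xs i).map (fun p => f p.2) = xs.map f := by
  intro xs
  induction xs with
  | nil => intro i; simp [PySem.List.enumerate_nil]
  | cons x rest ih =>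
      intro i
      simp [PySem.List.enumerate_cons, ih]

-- B's bucket lookup: the bucket at c collects exactly the indices with count c, in order.
lemma bucket_getD (f : List Int → Int) (l : List (Int × List Int)) (c : Int) :
    (l.foldl (fun (d : PySem.Dict Int (List Int)) p =>
        d.modify (f p.2) [] (fun v => v ++ [p.1])) PySem.Dict.empty).getD c []
      = (l.filter (fun p => f p.2 == c)).map (fun p => p.1) := by
  have h1 : l.foldl (fun (d : PySem.Dict Int (List Int)) p =>
        d.modify (f p.2) [] (fun v => v ++ [p.1])) PySem.Dict.empty
      = (l.map (fun p => (f p.2, p.1))).foldl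
          (fun (d : PySem.Dict Int (List Int)) q => d.modify q.1 [] (fun v => v ++ [q.2]))
          PySem.Dict.empty := by
    rw [List.foldl_map]
  rw [h1, PySem.Dict.getD_foldl_modify_append]
  rw [List.filter_map, List.map_map]
  rfl

-- The max over the bucket keys is the fold-max of the (nonnegative) counts.
lemma maxD_keys_eq (ks cs : List Int) (hmem : ∀ x : Int, x ∈ ks ↔ x ∈ cs)
    (hnn : ∀ x ∈ cs, (0 : Int) ≤ x) :
    PySem.List.maxD ks (fun k => k) 0 = cs.foldl max 0 := by
  cases ks with
  | nil =>
      have hcs : cs = [] := by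
        apply List.eq_nil_iff_forall_not_mem.mpr
        intro x hx
        exact (List.not_mem_nil).elim ((hmem x).mpr hx)
      subst hcs
      simp [PySem.List.maxD, PySem.List.max?]
  | cons k kt =>
      have hM : PySem.List.maxD (k :: kt) (fun k => k) 0 = kt.foldl max k := by
        simp [PySem.List.maxD, PySem.List.max?_id_cons]
      rw [hM]
      have hMmax : ∀ y ∈ (k :: kt), y ≤ kt.foldl max k := by
        intro y hy
        rcases List.mem_cons.mp hy with rfl | h
        · exact (PySem.List.le_foldl_max kt y).1
        · exact (PySem.List.le_foldl_max kt k).2 y h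
      have hMmem : kt.foldl max k ∈ (k :: kt) := by
        rcases PySem.List.foldl_max_mem kt k with h | h
        · simp [h]
        · exact List.mem_cons_of_mem _ h
      have hMcs : kt.foldl max k ∈ cs := (hmem _).mp hMmem
      have hMR : kt.foldl max k ≤ cs.foldl max 0 := (PySem.List.le_foldl_max cs 0).2 _ hMcs
      have hRM : cs.foldl max 0 ≤ kt.foldl max k := by
        rcases PySem.List.foldl_max_mem cs 0 with h | h
        · rw [h]; exact hnn _ hMcs
        · exact hMmax _ ((hmem _).mpr h)
      omega

theorem match_lane_seqs_spec_aux (lane_seg_ids : List Int) (all_lane_seqs : List (List Int)) :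
    match_lane_seqs lane_seg_ids all_lane_seqs = match_lane_seqs_alt lane_seg_ids all_lane_seqs := by
  set f := fun s => pvIsect lane_seg_ids s with hf_def
  have hA := loopA_spec f all_lane_seqs 0 0 [] (le_refl 0)
  unfold match_lane_seqs match_lane_seqs_alt
  rw [hA]
  simp only
  set l := PySem.List.enumerate all_lane_seqs 0 with hl_def
  set b := all_lane_seqs.foldl (fun a s => max a (f s)) 0 with hb_def
  set buckets := l.foldl
      (fun (d : PySem.Dict Int (List Int)) p =>
        d.modify (pvIsect lane_seg_ids p.2) [] (fun v => v ++ [p.1])) PySem.Dict.empty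
    with hbk_def
  -- keys of the buckets dict are exactly the counts, as a set
  have hkeys : buckets.keys = PySem.Set.update (PySem.Dict.empty : PySem.Dict Int (List Int)).keys
      (l.map (fun p => f p.2)) := by
    rw [hbk_def]
    exact PySem.Dict.keys_foldl_modify_key l (fun p => f p.2) []
      (fun _ p => fun v => v ++ [p.1]) PySem.Dict.empty
  have hmem : ∀ x : Int, x ∈ buckets.keys ↔ x ∈ all_lane_seqs.map f := by
    intro x
    rw [hkeys, PySem.Dict.keys_empty, ← enumerate_map_snd f all_lane_seqs 0]
    rw [PySem.Set.mem_update]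
    simp [hl_def]
  have hnn : ∀ x ∈ all_lane_seqs.map f, (0 : Int) ≤ x := by
    intro x hx
    rcases List.mem_map.mp hx with ⟨s, _, rfl⟩
    exact pvIsect_nonneg _ _
  have hbfold : (all_lane_seqs.map f).foldl max 0 = b := by
    rw [hb_def, List.foldl_map]
  have hbest : PySem.List.maxD buckets.keys (fun k => k) 0 = b := by
    rw [maxD_keys_eq buckets.keys (all_lane_seqs.map f) hmem hnn, hbfold]
  rw [hbest]
  have hget : buckets.getD b [] = (l.filter (fun p => f p.2 == b)).map (fun p => p.1) := by
    rw [hbk_def]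
    exact bucket_getD f l b
  by_cases h : b > 0
  · rw [if_pos h, if_pos h]
    rw [← PySem.Dict.getD_eq_get?_getD, hget]
  · rw [if_neg h, if_neg h]
    simp

-- ===== VERDICT (by name: the statement is the Claim_ definition above) =====
theorem match_lane_seqs_spec : Claim_equal_match_lane_seqs := by
  intro lane_seg_ids all_lane_seqs _
  exact match_lane_seqs_spec_aux lane_seg_ids all_lane_seqs
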